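-- pv_equiv track=rewrite | github.com/webis-de/acl20-personal-characteristics-predicting-persuasiveness | pyspark/jobs/sub_com/category_subreddit_csv.py | subreddits_to_categories
-- ===== SOURCE A (Python) =====
-- def subreddits_to_categories(subreddit_df, subreddit_category):
--     category_subreddits = {}
--     for k,v in subreddit_df.items():
--         cat = subreddit_category.get(k, 'Other')
--
--         if cat not in category_subreddits:
--             category_subreddits[cat] = {}
--         category_subreddits[cat][k] = v
--
--     return category_subreddits
-- ===== SOURCE B (Python) =====
-- def subreddits_to_categories(subreddit_df, subreddit_category):
--     cats = list(dict.fromkeys(subreddit_category.get(k, 'Other') for k in subreddit_df))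
--     return {c: {k: v for k, v in subreddit_df.items()
--                 if subreddit_category.get(k, 'Other') == c}
--             for c in cats}
-- ===== Notes on version B (the rewrite author's own statement) =====
-- stated objective: alternative
-- what changed: Replaces A's single pass that incrementally maintains a nested dict with a two-pass scheme: first collect the distinct categories in first-appearance order (dict.fromkeys), then build each category's inner dict by a per-category filtering comprehension over the input.
import Mathlib
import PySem

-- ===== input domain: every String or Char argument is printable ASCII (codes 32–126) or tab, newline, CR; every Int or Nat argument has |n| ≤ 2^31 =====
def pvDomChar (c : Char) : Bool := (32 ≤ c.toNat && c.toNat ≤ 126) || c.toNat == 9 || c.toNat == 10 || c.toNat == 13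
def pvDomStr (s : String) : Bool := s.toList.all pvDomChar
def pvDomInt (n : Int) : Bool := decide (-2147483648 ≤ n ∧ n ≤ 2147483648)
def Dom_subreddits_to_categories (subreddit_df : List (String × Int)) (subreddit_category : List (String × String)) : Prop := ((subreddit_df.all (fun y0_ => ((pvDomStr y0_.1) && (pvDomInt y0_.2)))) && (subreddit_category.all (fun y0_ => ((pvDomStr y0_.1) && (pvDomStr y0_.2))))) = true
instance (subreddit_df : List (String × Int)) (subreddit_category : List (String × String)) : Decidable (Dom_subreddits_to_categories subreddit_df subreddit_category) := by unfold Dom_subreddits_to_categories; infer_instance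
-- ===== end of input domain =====

-- B builds the result in two passes (distinct categories in first-appearance order, then one
-- filtering pass per category) instead of A's single pass maintaining a nested dict; same result,
-- a different decomposition, no speed claim.

-- ===== PORT A =====
def subreddits_to_categories (subreddit_df : List (String × Int)) (subreddit_category : List (String × String)) : List (String × List (String × Int)) :=
  let scd := PySem.Dict.ofList subreddit_category
  let res := subreddit_df.foldl (fun (acc : PySem.Dict String (PySem.Dict String Int)) kv =>
    let cat := scd.getD kv.1 "Other"
    let acc := if acc.contains cat then acc else acc.insert cat PySem.Dict.empty
    acc.insert cat ((acc.getD cat PySem.Dict.empty).insert kv.1 kv.2)) PySem.Dict.empty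
  res.items.map (fun p => (p.1, p.2.items))

-- ===== PORT B =====
def subreddits_to_categories_alt (subreddit_df : List (String × Int)) (subreddit_category : List (String × String)) : List (String × List (String × Int)) :=
  let scd := PySem.Dict.ofList subreddit_category
  let cats := PySem.List.dedup (subreddit_df.map (fun kv => scd.getD kv.1 "Other"))
  cats.map (fun c => (c, (PySem.Dict.ofList (subreddit_df.filter (fun kv => scd.getD kv.1 "Other" == c))).items))

-- ===== PRECONDITION & SPEC =====
def Spec_subreddits_to_categories (subreddit_df : List (String × Int)) (subreddit_category : List (String × String)) (out : List (String × List (String × Int))) : Prop := out = subreddits_to_categories_alt subreddit_df subreddit_category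
instance (subreddit_df : List (String × Int)) (subreddit_category : List (String × String)) (out : List (String × List (String × Int))) : Decidable (Spec_subreddits_to_categories subreddit_df subreddit_category out) := by unfold Spec_subreddits_to_categories; infer_instance

-- ===== CLAIM (what is proved, stated in full; the proofs are below) =====
def Claim_equal_subreddits_to_categories : Prop := ∀ (subreddit_df : List (String × Int)) (subreddit_category : List (String × String)), Dom_subreddits_to_categories subreddit_df subreddit_category → Spec_subreddits_to_categories subreddit_df subreddit_category (subreddits_to_categories subreddit_df subreddit_category)

-- ===== LEMMAS AND PROOFS =====

-- A's loop body, abstracted over the (fixed) category map; definitionally equal to the lambda in port A.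
def pvStep (scd : PySem.Dict String String) (acc : PySem.Dict String (PySem.Dict String Int)) (kv : String × Int) : PySem.Dict String (PySem.Dict String Int) :=
  let cat := scd.getD kv.1 "Other"
  let acc := if acc.contains cat then acc else acc.insert cat PySem.Dict.empty
  acc.insert cat ((acc.getD cat PySem.Dict.empty).insert kv.1 kv.2)

-- one loop step adds the item's category to the outer key set
theorem pvStep_keys (scd : PySem.Dict String String) (acc : PySem.Dict String (PySem.Dict String Int)) (kv : String × Int) :
    (pvStep scd acc kv).keys = PySem.Set.add acc.keys (scd.getD kv.1 "Other") := by
  simp only [pvStep, PySem.Set.add]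
  generalize scd.getD kv.1 "Other" = cat
  have hc : PySem.Set.contains acc.keys cat = acc.contains cat := by
    simp [PySem.Set.contains, PySem.Dict.contains_eq_decide_mem_keys]
  rw [hc]
  by_cases h : acc.contains cat = true
  · rw [if_pos h, if_pos h, PySem.Dict.keys_insert_of_contains _ _ h]
  · rw [if_neg h, if_neg h,
      PySem.Dict.keys_insert_of_contains _ _ (by simp),
      PySem.Dict.keys_insert_of_not_contains _ _ (by simpa using h)]

-- one loop step appends (k, v) to the item's category bucket and leaves the others alone
theorem pvStep_getD (scd : PySem.Dict String String) (acc : PySem.Dict String (PySem.Dict String Int)) (kv : String × Int) (c : String) :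
    (pvStep scd acc kv).getD c PySem.Dict.empty =
      if c = scd.getD kv.1 "Other" then (acc.getD (scd.getD kv.1 "Other") PySem.Dict.empty).insert kv.1 kv.2
      else acc.getD c PySem.Dict.empty := by
  simp only [pvStep]
  generalize scd.getD kv.1 "Other" = cat
  by_cases h : acc.contains cat = true
  · rw [if_pos h, PySem.Dict.getD_insert]
  · rw [if_neg h, PySem.Dict.getD_insert]
    split_ifs with hc
    · subst hc
      rw [PySem.Dict.getD_insert, if_pos rfl, PySem.Dict.getD_of_not_contains _ _ (by simpa using h)]
    · rw [PySem.Dict.getD_insert, if_neg hc]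

-- outer keys of A's loop = categories of the processed items, first occurrences in order
theorem pvFold_keys (scd : PySem.Dict String String) (df : List (String × Int)) :
    (df.foldl (pvStep scd) PySem.Dict.empty).keys = PySem.Set.ofList (df.map (fun kv => scd.getD kv.1 "Other")) := by
  induction df using List.reverseRecOn with
  | nil => rfl
  | append_singleton l kv ih =>
      rw [List.foldl_append, List.map_append, PySem.Set.ofList_eq_foldl, List.foldl_append,
        ← PySem.Set.ofList_eq_foldl]
      simp [pvStep_keys, ih]

theorem pvDictOfList_append (l : List (String × Int)) (p : String × Int) :
    PySem.Dict.ofList (l ++ [p]) = (PySem.Dict.ofList l).insert p.1 p.2 := by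
  simp [PySem.Dict.ofList, PySem.Dict.update, List.foldl_append]

-- each bucket of A's loop = the dict of the items whose category is that bucket's key
theorem pvFold_getD (scd : PySem.Dict String String) (df : List (String × Int)) (c : String) :
    (df.foldl (pvStep scd) PySem.Dict.empty).getD c PySem.Dict.empty =
      PySem.Dict.ofList (df.filter (fun kv => scd.getD kv.1 "Other" == c)) := by
  induction df using List.reverseRecOn with
  | nil => rfl
  | append_singleton l kv ih =>
      rw [List.foldl_append, List.foldl_cons, List.foldl_nil, pvStep_getD, List.filter_append]
      by_cases hc : c = scd.getD kv.1 "Other"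
      · rw [if_pos hc]
        simp only [List.filter_cons, List.filter_nil, ← hc, beq_self_eq_true, if_true]
        rw [pvDictOfList_append, ih]
      · rw [if_neg hc, ih]
        simp only [List.filter_cons, List.filter_nil]
        rw [if_neg (by simpa using fun h => hc h.symm)]
        simp

theorem pvFold_nodup (scd : PySem.Dict String String) (df : List (String × Int)) :
    (df.foldl (pvStep scd) PySem.Dict.empty).keys.Nodup := by
  rw [pvFold_keys]; exact PySem.Set.nodup_ofList _

-- ===== VERDICT (by name: the statement is the Claim_ definition above) =====
theorem subreddits_to_categories_spec : Claim_equal_subreddits_to_categories := by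
  intro df sc _
  unfold Spec_subreddits_to_categories
  show (df.foldl (pvStep (PySem.Dict.ofList sc)) PySem.Dict.empty).items.map (fun p => (p.1, p.2.items))
      = subreddits_to_categories_alt df sc
  show _ = (PySem.List.dedup (df.map (fun kv => (PySem.Dict.ofList sc).getD kv.1 "Other"))).map
      (fun c => (c, (PySem.Dict.ofList (df.filter (fun kv => (PySem.Dict.ofList sc).getD kv.1 "Other" == c))).items))
  rw [PySem.List.dedup_eq_ofList,
    PySem.Dict.items_eq_map_keys _ (pvFold_nodup _ df) PySem.Dict.empty,
    pvFold_keys, List.map_map]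
  exact List.map_congr_left (fun c hc => by simp [Function.comp, pvFold_getD])
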